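-- pv_equiv track=rewrite | github.com/pypi-data/pypi-mirror-404 | packages/enable-ai/enable_ai-0.3.28.tar.gz/enable-ai-0.3.28/src/enable_ai/schema_generator/schema_converter.py | _infer_display_field
-- ===== SOURCE A (Python) =====
-- from typing import Dict, Any, List, Optional
--
-- def _infer_display_field(resource_name: str, fields: List[str]) -> Optional[str]:
--     """
--     Infer a primary display field for a resource from its field list.
--
--     Generic heuristics only – no project-specific knowledge:
--     1. Exact "name" if present.
--     2. Field ending with "_name".
--     3. Fields containing "name" (excluding obvious unit-like fields).
--     4. Common identifiers like "title", "label", "display_name", "code".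
--     """
--     if not fields:
--         return None
--
--     lower_fields = {f: f.lower() for f in fields}
--
--     # Helper to filter out unit-like fields
--     def is_unit_like(fname: str) -> bool:
--         lf = fname.lower()
--         return any(
--             key in lf
--             for key in ["unit", "uom", "measurement", "measure", "qty_per", "per_unit"]
--         )
--
--     # 1) Exact "name"
--     for f, lf in lower_fields.items():
--         if lf == "name" and not is_unit_like(f):
--             return f
--
--     # 2) Ends with "_name"
--     for f, lf in lower_fields.items():
--         if lf.endswith("_name") and not is_unit_like(f):
--             return f
--
--     # 3) Contains "name" (but avoid unit-like)
--     for f, lf in lower_fields.items():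
--         if "name" in lf and not is_unit_like(f):
--             return f
--
--     # 4) Common identifier fields
--     preferred = ["title", "label", "display_name", "short_name", "code", "sku"]
--     for pref in preferred:
--         for f, lf in lower_fields.items():
--             if lf == pref and not is_unit_like(f):
--                 return f
--
--     # Fallback: first non unit-like field
--     for f in fields:
--         if not is_unit_like(f):
--             return f
--
--     # As a last resort, just return the first field
--     return fields[0]
-- ===== SOURCE B (Python) =====
-- from typing import List, Optional
--
-- _UNIT_KEYS = ["unit", "uom", "measurement", "measure", "qty_per", "per_unit"]
-- _PREFERRED = ["title", "label", "display_name", "short_name", "code", "sku"]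
--
--
-- def _rank(f: str):
--     """Priority key for a field: smaller tuples are better display candidates."""
--     lf = f.lower()
--     if any(k in lf for k in _UNIT_KEYS):
--         return (6, 0)
--     if lf == "name":
--         return (1, 0)
--     if lf.endswith("_name"):
--         return (2, 0)
--     if "name" in lf:
--         return (3, 0)
--     if lf in _PREFERRED:
--         return (4, _PREFERRED.index(lf))
--     return (5, 0)
--
--
-- def _infer_display_field(resource_name: str, fields: List[str]) -> Optional[str]:
--     if not fields:
--         return None
--     best = fields[0]
--     best_key = _rank(best)
--     for f in fields[1:]:
--         r = _rank(f)
--         if r < best_key: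
--             best, best_key = f, r
--     return best
-- ===== Notes on version B (the rewrite author's own statement) =====
-- stated objective: simpler
-- what changed: A builds a field->lower dict and makes five separate priority scans over it (plus a nested preferred-list loop); B computes one priority rank tuple per field and keeps the first field with the minimal rank in a single pass.
import Mathlib
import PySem

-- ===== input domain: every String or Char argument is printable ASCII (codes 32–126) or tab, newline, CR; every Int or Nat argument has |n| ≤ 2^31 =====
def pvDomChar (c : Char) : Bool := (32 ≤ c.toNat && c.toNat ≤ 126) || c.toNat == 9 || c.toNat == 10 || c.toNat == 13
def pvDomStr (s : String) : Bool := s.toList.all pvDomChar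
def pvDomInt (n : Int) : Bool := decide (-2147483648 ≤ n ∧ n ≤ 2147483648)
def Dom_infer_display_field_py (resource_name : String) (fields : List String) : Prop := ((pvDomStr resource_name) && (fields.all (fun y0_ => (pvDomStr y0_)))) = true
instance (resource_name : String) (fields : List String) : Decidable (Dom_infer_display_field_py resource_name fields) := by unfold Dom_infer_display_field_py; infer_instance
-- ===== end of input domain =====

-- B replaces A's five separate scans by one rank function and a single first-wins
-- minimum pass over the fields (objective: simpler).

-- ===== PORT A =====
def pyUnitKeys : List String := ["unit", "uom", "measurement", "measure", "qty_per", "per_unit"]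

def isUnitLike (fname : String) : Bool :=
  pyUnitKeys.any (fun k => PySem.Str.isIn k (PySem.Str.lower fname))

def pyPreferred : List String := ["title", "label", "display_name", "short_name", "code", "sku"]

def infer_display_field_py (resource_name : String) (fields : List String) : Option String :=
  match fields with
  | [] => none
  | f0 :: _ =>
    let lower_fields : PySem.Dict String String :=
      fields.foldl (fun d f => d.insert f (PySem.Str.lower f)) PySem.Dict.empty
    -- 1) Exact "name"
    match lower_fields.items.find? (fun p => p.2 == "name" && !isUnitLike p.1) with
    | some p => some p.1
    | none =>
      -- 2) Ends with "_name"
      match lower_fields.items.find? (fun p => PySem.Str.endswith p.2 "_name" && !isUnitLike p.1) with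
      | some p => some p.1
      | none =>
        -- 3) Contains "name"
        match lower_fields.items.find? (fun p => PySem.Str.isIn "name" p.2 && !isUnitLike p.1) with
        | some p => some p.1
        | none =>
          -- 4) Common identifier fields
          match pyPreferred.findSome?
              (fun pref => (lower_fields.items.find? (fun p => p.2 == pref && !isUnitLike p.1)).map (·.1)) with
          | some f => some f
          | none =>
            -- Fallback: first non unit-like field, else fields[0]
            match fields.find? (fun f => !isUnitLike f) with
            | some f => some f
            | none => some f0

-- ===== PORT B =====
def rankOf (f : String) : Nat × Nat :=
  let lf := PySem.Str.lower f
  if isUnitLike f then (6, 0)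
  else if lf == "name" then (1, 0)
  else if PySem.Str.endswith lf "_name" then (2, 0)
  else if PySem.Str.isIn "name" lf then (3, 0)
  else
    match PySem.List.index? pyPreferred lf with
    | some j => (4, j)
    | none => (5, 0)

-- Python's `<` on the 2-tuples returned by _rank (lexicographic)
def tupLt (a b : Nat × Nat) : Bool := a.1 < b.1 || (a.1 == b.1 && a.2 < b.2)

def infer_display_field_py_alt (resource_name : String) (fields : List String) : Option String :=
  match fields with
  | [] => none
  | f0 :: rest =>
    let best := rest.foldl
      (fun acc f => let r := rankOf f; if tupLt r acc.2 then (f, r) else acc)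
      (f0, rankOf f0)
    some best.1

-- ===== PRECONDITION & SPEC =====
def Spec_infer_display_field_py (resource_name : String) (fields : List String) (out : Option String) : Prop := out = infer_display_field_py_alt resource_name fields
instance (resource_name : String) (fields : List String) (out : Option String) : Decidable (Spec_infer_display_field_py resource_name fields out) := by unfold Spec_infer_display_field_py; infer_instance

-- ===== CLAIM (what is proved, stated in full; the proofs are below) =====
def Claim_equal_infer_display_field_py : Prop := ∀ (resource_name : String) (fields : List String), Dom_infer_display_field_py resource_name fields → Spec_infer_display_field_py resource_name fields (infer_display_field_py resource_name fields)

-- ===== LEMMAS AND PROOFS =====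

-- flat encoding of B's rank tuples (lexicographic, since the second component is < 16)
def eKey (f : String) : Nat := 16 * (rankOf f).1 + (rankOf f).2

-- the element B's loop keeps: first element of b :: l with minimal eKey
def argmin (b : String) (l : List String) : String :=
  l.foldl (fun b f => if eKey f < eKey b then f else b) b

theorem idx_lt (lf : String) (j : Nat) (h : PySem.List.index? pyPreferred lf = some j) : j < 6 := by
  obtain ⟨hk, _, _⟩ := PySem.List.getElem_of_index?_eq_some h
  simpa [pyPreferred] using hk

theorem rank_cases (f : String) :
    (isUnitLike f = true ∧ eKey f = 96) ∨
    (isUnitLike f = false ∧ (PySem.Str.lower f == "name") = true ∧ eKey f = 16) ∨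
    (isUnitLike f = false ∧ (PySem.Str.lower f == "name") = false ∧
      PySem.Str.endswith (PySem.Str.lower f) "_name" = true ∧ eKey f = 32) ∨
    (isUnitLike f = false ∧ (PySem.Str.lower f == "name") = false ∧
      PySem.Str.endswith (PySem.Str.lower f) "_name" = false ∧
      PySem.Str.isIn "name" (PySem.Str.lower f) = true ∧ eKey f = 48) ∨
    (isUnitLike f = false ∧ (PySem.Str.lower f == "name") = false ∧
      PySem.Str.endswith (PySem.Str.lower f) "_name" = false ∧
      PySem.Str.isIn "name" (PySem.Str.lower f) = false ∧
      ∃ j, j < 6 ∧ PySem.List.index? pyPreferred (PySem.Str.lower f) = some j ∧ eKey f = 64 + j) ∨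
    (isUnitLike f = false ∧ (PySem.Str.lower f == "name") = false ∧
      PySem.Str.endswith (PySem.Str.lower f) "_name" = false ∧
      PySem.Str.isIn "name" (PySem.Str.lower f) = false ∧
      PySem.List.index? pyPreferred (PySem.Str.lower f) = none ∧ eKey f = 80) := by
  by_cases h1 : isUnitLike f = true
  · have hr : rankOf f = (6, 0) := by simp only [rankOf]; rw [if_pos h1]
    exact Or.inl ⟨h1, by simp [eKey, hr]⟩
  · replace h1 : isUnitLike f = false := by simpa using h1
    by_cases h2 : (PySem.Str.lower f == "name") = true
    · have hr : rankOf f = (1, 0) := by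
        simp only [rankOf]; rw [if_neg (by rw [h1]; simp), if_pos h2]
      exact Or.inr (Or.inl ⟨h1, h2, by simp [eKey, hr]⟩)
    · replace h2 : (PySem.Str.lower f == "name") = false := by simpa using h2
      by_cases h3 : PySem.Str.endswith (PySem.Str.lower f) "_name" = true
      · have hr : rankOf f = (2, 0) := by
          simp only [rankOf]; rw [if_neg (by rw [h1]; simp), if_neg (by rw [h2]; simp), if_pos h3]
        exact Or.inr (Or.inr (Or.inl ⟨h1, h2, h3, by simp [eKey, hr]⟩))
      · replace h3 : PySem.Str.endswith (PySem.Str.lower f) "_name" = false := by simpa using h3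
        by_cases h4 : PySem.Str.isIn "name" (PySem.Str.lower f) = true
        · have hr : rankOf f = (3, 0) := by
            simp only [rankOf]
            rw [if_neg (by rw [h1]; simp), if_neg (by rw [h2]; simp), if_neg (by rw [h3]; simp), if_pos h4]
          exact Or.inr (Or.inr (Or.inr (Or.inl ⟨h1, h2, h3, h4, by simp [eKey, hr]⟩)))
        · replace h4 : PySem.Str.isIn "name" (PySem.Str.lower f) = false := by simpa using h4
          obtain h5 | ⟨j, h5⟩ := Option.eq_none_or_eq_some (PySem.List.index? pyPreferred (PySem.Str.lower f))
          · have hr : rankOf f = (5, 0) := by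
              simp only [rankOf]
              rw [if_neg (by rw [h1]; simp), if_neg (by rw [h2]; simp), if_neg (by rw [h3]; simp),
                if_neg (by rw [h4]; simp), h5]
            exact Or.inr (Or.inr (Or.inr (Or.inr (Or.inr ⟨h1, h2, h3, h4, h5, by simp [eKey, hr]⟩))))
          · have hr : rankOf f = (4, j) := by
              simp only [rankOf]
              rw [if_neg (by rw [h1]; simp), if_neg (by rw [h2]; simp), if_neg (by rw [h3]; simp),
                if_neg (by rw [h4]; simp), h5]
            exact Or.inr (Or.inr (Or.inr (Or.inr (Or.inl
              ⟨h1, h2, h3, h4, j, idx_lt _ _ h5, h5, by simp [eKey, hr]⟩))))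

theorem rank_snd_lt (f : String) : (rankOf f).2 < 16 := by
  simp only [rankOf]
  split_ifs
  · simp
  · simp
  · simp
  · simp
  · rcases h : PySem.List.index? pyPreferred (PySem.Str.lower f) with _ | j <;> simp
    have := idx_lt _ _ h; omega

theorem tupLt_rank (a b : String) : tupLt (rankOf a) (rankOf b) = decide (eKey a < eKey b) := by
  have ha := rank_snd_lt a; have hb := rank_snd_lt b
  simp only [eKey, tupLt]
  rw [Bool.eq_iff_iff]
  simp only [Bool.or_eq_true, Bool.and_eq_true, decide_eq_true_eq, beq_iff_eq, Nat.lt_iff_add_one_le]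
  omega

theorem foldB (l : List String) (b : String) :
    l.foldl (fun acc f => let r := rankOf f; if tupLt r acc.2 then (f, r) else acc) (b, rankOf b)
      = (argmin b l, rankOf (argmin b l)) := by
  induction l generalizing b with
  | nil => simp [argmin]
  | cons x xs ih =>
    simp only [List.foldl_cons, argmin, tupLt_rank]
    by_cases h : eKey x < eKey b
    · simp only [h, decide_true, if_true]
      exact ih x
    · simp only [h, decide_false, if_false]
      exact ih b

theorem argmin_le (l : List String) (b : String) :
    ∀ x ∈ b :: l, eKey (argmin b l) ≤ eKey x := by
  induction l generalizing b with
  | nil => intro x hx; simp at hx; subst hx; simp [argmin]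
  | cons y ys ih =>
    intro x hx
    have hstep : argmin b (y :: ys) = argmin (if eKey y < eKey b then y else b) ys := by simp only [argmin, List.foldl_cons]
    set c := if eKey y < eKey b then y else b with hc
    have hcb : eKey c ≤ eKey b := by rw [hc]; split_ifs with h <;> omega
    have hcy : eKey c ≤ eKey y := by rw [hc]; split_ifs with h <;> omega
    rw [hstep]
    rcases List.mem_cons.mp hx with rfl | hx2
    · exact le_trans (ih c c (List.mem_cons_self ..)) hcb
    · rcases List.mem_cons.mp hx2 with rfl | hx3
      · exact le_trans (ih c c (List.mem_cons_self ..)) hcy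
      · exact ih c x (List.mem_cons_of_mem _ hx3)

theorem argmin_find (l : List String) (b : String) :
    (b :: l).find? (fun x => decide (eKey x ≤ eKey (argmin b l))) = some (argmin b l) := by
  induction l generalizing b with
  | nil => simp [argmin]
  | cons x xs ih =>
    by_cases h : eKey x < eKey b
    · have harg : argmin b (x :: xs) = argmin x xs := by
        simp only [argmin, List.foldl_cons]; rw [if_pos h]
      rw [harg]
      have hb : eKey (argmin x xs) ≤ eKey x := argmin_le xs x x (List.mem_cons_self ..)
      rw [List.find?_cons_of_neg (by simp only [decide_eq_true_eq]; omega), ih x]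
    · have harg : argmin b (x :: xs) = argmin b xs := by
        simp only [argmin, List.foldl_cons]; rw [if_neg h]
      rw [harg]
      have ihb := ih b
      by_cases hb : eKey b ≤ eKey (argmin b xs)
      · have hbb : argmin b xs = b := by
          rw [List.find?_cons_of_pos (by simp [hb])] at ihb
          exact (Option.some_inj.mp ihb).symm
        rw [hbb] at *
        exact List.find?_cons_of_pos (by simpa using hb)
      · have hlt : eKey (argmin b xs) < eKey b := by omega
        rw [List.find?_cons_of_neg (by simp only [decide_eq_true_eq]; omega),
            List.find?_cons_of_neg (by simp only [decide_eq_true_eq]; omega)]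
        rw [List.find?_cons_of_neg (by simp only [decide_eq_true_eq]; omega)] at ihb
        exact ihb

theorem pyPreferred_nodup : pyPreferred.Nodup := by decide

theorem band1 (f : String) :
    (PySem.Str.lower f == "name" && !isUnitLike f) = decide (eKey f = 16) := by
  rcases rank_cases f with ⟨hu, he⟩ | ⟨hu, hn, he⟩ | ⟨hu, hn, hs, he⟩ |
    ⟨hu, hn, hs, hi, he⟩ | ⟨hu, hn, hs, hi, j, hj, hidx, he⟩ | ⟨hu, hn, hs, hi, hidx, he⟩
  · rw [hu, he]; simp
  · rw [hn, hu, he]; simp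
  · rw [hn, hu, he]; simp
  · rw [hn, hu, he]; simp
  · rw [hn, hu, he]; have hne : 64 + j ≠ 16 := by omega
    simp [hne]
  · rw [hn, hu, he]; simp

theorem band2 (f : String) :
    (PySem.Str.endswith (PySem.Str.lower f) "_name" && !isUnitLike f) = decide (eKey f = 32) := by
  have hval : PySem.Str.endswith "name" "_name" = false := by decide
  rcases rank_cases f with ⟨hu, he⟩ | ⟨hu, hn, he⟩ | ⟨hu, hn, hs, he⟩ |
    ⟨hu, hn, hs, hi, he⟩ | ⟨hu, hn, hs, hi, j, hj, hidx, he⟩ | ⟨hu, hn, hs, hi, hidx, he⟩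
  · rw [hu, he]; simp
  · have hlf : PySem.Str.lower f = "name" := by simpa using hn
    rw [hlf, hval, he]; simp
  · rw [hs, hu, he]; simp
  · rw [hs, hu, he]; simp
  · rw [hs, hu, he]; have hne : 64 + j ≠ 32 := by omega
    simp [hne]
  · rw [hs, hu, he]; simp

theorem band3 (f : String) :
    (PySem.Str.isIn "name" (PySem.Str.lower f) && !isUnitLike f) = decide (eKey f ≤ 48) := by
  rcases rank_cases f with ⟨hu, he⟩ | ⟨hu, hn, he⟩ | ⟨hu, hn, hs, he⟩ |
    ⟨hu, hn, hs, hi, he⟩ | ⟨hu, hn, hs, hi, j, hj, hidx, he⟩ | ⟨hu, hn, hs, hi, hidx, he⟩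
  · rw [hu, he]; simp
  · have hlf : PySem.Str.lower f = "name" := by simpa using hn
    have hval : PySem.Str.isIn "name" "name" = true := by decide
    rw [hlf, hval, hu, he]; simp
  · have hsuf : ("_name".toList) <:+ (PySem.Str.lower f).toList := by
      rw [PySem.Str.endswith_eq] at hs
      exact (PySem.Chars.endswith_iff _ _).mp hs
    have hsub : ("name".toList) <:+ ("_name".toList) := by decide
    have hinf : ("name".toList) <:+: (PySem.Str.lower f).toList := (hsub.trans hsuf).isInfix
    have hin : PySem.Str.isIn "name" (PySem.Str.lower f) = true :=
      (PySem.Str.isIn_iff_infix _ _).mpr hinf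
    rw [hin, hu, he]; simp
  · rw [hi, hu, he]; simp
  · rw [hi, he]; have hne : ¬ (64 + j ≤ 48) := by omega
    simp [hne]
  · rw [hi, he]; simp

theorem band4 (j : Nat) (hj : j < 6) (f : String) (hf : ¬ eKey f ≤ 48) :
    (PySem.Str.lower f == pyPreferred[j] && !isUnitLike f) = decide (eKey f = 64 + j) := by
  rcases rank_cases f with ⟨hu, he⟩ | ⟨hu, hn, he⟩ | ⟨hu, hn, hs, he⟩ |
    ⟨hu, hn, hs, hi, he⟩ | ⟨hu, hn, hs, hi, jj, hjj, hidx, he⟩ | ⟨hu, hn, hs, hi, hidx, he⟩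
  · rw [hu, he]; have hne : (96 : Nat) ≠ 64 + j := by omega
    simp [hne]
  · exact absurd (by rw [he]; norm_num) hf
  · exact absurd (by rw [he]; norm_num) hf
  · exact absurd (le_of_eq he) hf
  · obtain ⟨hk, hget, _⟩ := PySem.List.getElem_of_index?_eq_some hidx
    rw [he, Bool.eq_iff_iff]
    simp only [Bool.and_eq_true, beq_iff_eq, Bool.not_eq_true', decide_eq_true_eq]
    constructor
    · rintro ⟨hl, -⟩
      have hgg : pyPreferred[jj] = pyPreferred[j] := by rw [hget, hl]
      have := (pyPreferred_nodup.getElem_inj_iff).mp hgg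
      omega
    · intro heq
      have hjjj : jj = j := by omega
      subst hjjj
      exact ⟨hget.symm, hu⟩
  · rw [he, Bool.eq_iff_iff]
    simp only [Bool.and_eq_true, beq_iff_eq, Bool.not_eq_true', decide_eq_true_eq]
    constructor
    · rintro ⟨hl, -⟩
      have hmem : PySem.Str.lower f ∈ pyPreferred := by
        rw [hl]; exact List.getElem_mem _
      rw [PySem.List.index?_eq_none_iff] at hidx
      exact absurd hmem hidx
    · intro heq; omega

theorem band5 (f : String) : (!isUnitLike f) = decide (eKey f ≤ 80) := by
  rcases rank_cases f with ⟨hu, he⟩ | ⟨hu, hn, he⟩ | ⟨hu, hn, hs, he⟩ |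
    ⟨hu, hn, hs, hi, he⟩ | ⟨hu, hn, hs, hi, j, hj, hidx, he⟩ | ⟨hu, hn, hs, hi, hidx, he⟩
  · rw [hu, he]; simp
  · rw [hu, he]; simp
  · rw [hu, he]; simp
  · rw [hu, he]; simp
  · rw [hu, he]; have hle : 64 + j ≤ 80 := by omega
    simp [hle]
  · rw [hu, he]; simp

theorem eKey_le (f : String) : eKey f ≤ 96 := by
  rcases rank_cases f with ⟨_, he⟩ | ⟨_, _, he⟩ | ⟨_, _, _, he⟩ |
    ⟨_, _, _, _, he⟩ | ⟨_, _, _, _, j, hj, _, he⟩ | ⟨_, _, _, _, _, he⟩ <;> omega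

theorem eKey_values (f : String) : eKey f = 16 ∨ eKey f = 32 ∨ eKey f = 48 ∨
    (64 ≤ eKey f ∧ eKey f ≤ 69) ∨ eKey f = 80 ∨ eKey f = 96 := by
  rcases rank_cases f with ⟨_, he⟩ | ⟨_, _, he⟩ | ⟨_, _, _, he⟩ |
    ⟨_, _, _, _, he⟩ | ⟨_, _, _, _, j, hj, _, he⟩ | ⟨_, _, _, _, _, he⟩ <;> omega

theorem find?_congr_mem {α : Type} (p q : α → Bool) (l : List α)
    (h : ∀ x ∈ l, p x = q x) : l.find? p = l.find? q := by
  induction l with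
  | nil => rfl
  | cons x xs ih =>
    have hx := h x (List.mem_cons_self ..)
    rcases hp : p x with _ | _
    · rw [List.find?_cons_of_neg (by simp [hp]), List.find?_cons_of_neg (by simp [← hx, hp])]
      exact ih (fun y hy => h y (List.mem_cons_of_mem _ hy))
    · rw [List.find?_cons_of_pos (by simp [hp]), List.find?_cons_of_pos (by simp [← hx, hp])]

theorem find?_discard (p : String → Bool) (s : List String) (x : String) (hx : p x = false) :
    (PySem.Set.discard s x).find? p = s.find? p := by
  induction s with
  | nil => rfl
  | cons y ys ih =>
    by_cases hyx : y = x
    · subst hyx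
      have : PySem.Set.discard (y :: ys) y = PySem.Set.discard ys y := by
        simp [PySem.Set.discard]
      rw [this, ih, List.find?_cons_of_neg (by simp [hx])]
    · have : PySem.Set.discard (y :: ys) x = y :: PySem.Set.discard ys x := by
        simp [PySem.Set.discard, hyx]
      rw [this]
      rcases hp : p y with _ | _
      · rw [List.find?_cons_of_neg (by simp [hp]), List.find?_cons_of_neg (by simp [hp]), ih]
      · rw [List.find?_cons_of_pos (by simp [hp]), List.find?_cons_of_pos (by simp [hp])]

theorem find?_ofList (p : String → Bool) (l : List String) :
    (PySem.Set.ofList l).find? p = l.find? p := by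
  induction l with
  | nil => rfl
  | cons x xs ih =>
    rw [PySem.Set.ofList_cons]
    rcases hp : p x with _ | _
    · rw [List.find?_cons_of_neg (by simp [hp]), List.find?_cons_of_neg (by simp [hp]),
        find?_discard p _ x hp, ih]
    · rw [List.find?_cons_of_pos (by simp [hp]), List.find?_cons_of_pos (by simp [hp])]

theorem dict_items_gen (l : List String) (s : PySem.Set String)
    (d : PySem.Dict String String)
    (hd : d.items = s.map (fun f => (f, PySem.Str.lower f))) :
    (l.foldl (fun d f => d.insert f (PySem.Str.lower f)) d).items
      = (PySem.Set.update s l).map (fun f => (f, PySem.Str.lower f)) := by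
  induction l generalizing s d with
  | nil => simpa [PySem.Set.update_nil] using hd
  | cons x xs ih =>
    rw [List.foldl_cons, PySem.Set.update_cons]
    apply ih
    have hkeys : d.keys = s := by
      simp only [PySem.Dict.keys, hd, List.map_map]
      have hcomp : ((fun x : String × String => x.1) ∘ fun f : String => (f, PySem.Str.lower f)) = id := rfl
      rw [hcomp, List.map_id]
    by_cases hmem : x ∈ s
    · have hc : d.contains x = true := by
        rw [PySem.Dict.contains_iff_mem_keys, hkeys]; exact hmem
      rw [PySem.Dict.items_insert_of_contains _ _ hc, hd, PySem.Set.add_of_mem hmem]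
      rw [List.map_map]
      apply List.map_congr_left
      intro a ha
      by_cases hax : a = x <;> simp [hax]
    · have hc : d.contains x = false := by
        rw [Bool.eq_false_iff]
        intro hcc
        rw [PySem.Dict.contains_iff_mem_keys, hkeys] at hcc
        exact hmem hcc
      rw [PySem.Dict.items_insert_of_not_contains _ _ hc, hd, PySem.Set.add_of_not_mem hmem]
      simp

theorem dict_items (l : List String) :
    (l.foldl (fun d f => d.insert f (PySem.Str.lower f)) PySem.Dict.empty).items
      = (PySem.Set.ofList l).map (fun f => (f, PySem.Str.lower f)) := by
  have := dict_items_gen l [] PySem.Dict.empty (by rfl)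
  simpa [PySem.Set.update_empty] using this

-- ===== VERDICT (by name: the statement is the Claim_ definition above) =====
theorem find?_eq_none_of_lt (fs : List String) (c : Nat) (h : ∀ x ∈ fs, c < eKey x) :
    fs.find? (fun x => decide (eKey x = c)) = none :=
  List.find?_eq_none.mpr (fun x hx => by have := h x hx; simp; omega)

theorem find?le_eq_none_of_lt (fs : List String) (c : Nat) (h : ∀ x ∈ fs, c < eKey x) :
    fs.find? (fun x => decide (eKey x ≤ c)) = none :=
  List.find?_eq_none.mpr (fun x hx => by have := h x hx; simp; omega)

theorem infer_display_field_py_spec : Claim_equal_infer_display_field_py := by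
  intro rn fields _hdom
  unfold Spec_infer_display_field_py
  cases fields with
  | nil => rfl
  | cons f0 rest =>
    have hB : infer_display_field_py_alt rn (f0 :: rest) = some (argmin f0 rest) := by
      simp only [infer_display_field_py_alt]
      rw [foldB]
    rw [hB]
    have hit := dict_items (f0 :: rest)
    have hb1 : (fun f : String => (PySem.Str.lower f == "name" && !isUnitLike f))
        = (fun f => decide (eKey f = 16)) := funext band1
    have hb2 : (fun f : String => (PySem.Str.endswith (PySem.Str.lower f) "_name" && !isUnitLike f))
        = (fun f => decide (eKey f = 32)) := funext band2
    have hb3 : (fun f : String => (PySem.Str.isIn "name" (PySem.Str.lower f) && !isUnitLike f))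
        = (fun f => decide (eKey f ≤ 48)) := funext band3
    have hb5 : (fun f : String => (!isUnitLike f)) = (fun f => decide (eKey f ≤ 80)) := funext band5
    simp only [infer_display_field_py, hit, List.find?_map, find?_ofList, Function.comp_def,
      pyPreferred, List.findSome?_cons, hb1, hb2, hb3, hb5]
    simp only [List.findSome?_nil]
    have hle := argmin_le rest f0
    have hfind := argmin_find rest f0
    set a := argmin f0 rest with ha
    have hsome : ∀ (c : Nat), eKey a = c →
        List.find? (fun x => decide (eKey x = c)) (f0 :: rest) = some a := by
      intro c hc
      rw [find?_congr_mem _ (fun x => decide (eKey x ≤ eKey a)) _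
        (fun x hx => by have := hle x hx; rw [decide_eq_decide]; omega), hfind]
    have hsomeLe : ∀ (c : Nat), eKey a = c →
        List.find? (fun x => decide (eKey x ≤ c)) (f0 :: rest) = some a := by
      intro c hc; rw [← hc]; exact hfind
    have hnone : ∀ (c : Nat), c < eKey a →
        List.find? (fun x => decide (eKey x = c)) (f0 :: rest) = none := by
      intro c hc
      exact find?_eq_none_of_lt _ _ (fun x hx => by have := hle x hx; omega)
    have hnoneLe : ∀ (c : Nat), c < eKey a →
        List.find? (fun x => decide (eKey x ≤ c)) (f0 :: rest) = none := by
      intro c hc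
      exact find?le_eq_none_of_lt _ _ (fun x hx => by have := hle x hx; omega)
    rcases eKey_values a with he | he | he | ⟨h64, h69⟩ | he | he
    · rw [hsome 16 he]; simp
    · rw [hnone 16 (by omega), hsome 32 he]; simp
    · rw [hnone 16 (by omega), hnone 32 (by omega), hsomeLe 48 he]; simp
    · have h48 : ∀ x ∈ f0 :: rest, ¬ eKey x ≤ 48 := by
        intro x hx; have := hle x hx; omega
      have hp : ∀ (j : Nat) (hj : j < 6),
          List.find? (fun x => PySem.Str.lower x == pyPreferred[j] && !isUnitLike x) (f0 :: rest)
            = List.find? (fun x => decide (eKey x = 64 + j)) (f0 :: rest) :=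
        fun j hj => find?_congr_mem _ _ _ (fun x hx => band4 j hj x (h48 x hx))
      have hp0 := hp 0 (by norm_num); have hp1 := hp 1 (by norm_num)
      have hp2 := hp 2 (by norm_num); have hp3 := hp 3 (by norm_num)
      have hp4 := hp 4 (by norm_num); have hp5 := hp 5 (by norm_num)
      norm_num [pyPreferred] at hp0 hp1 hp2 hp3 hp4 hp5
      rw [hnone 16 (by omega), hnone 32 (by omega), hnoneLe 48 (by omega),
        hp0, hp1, hp2, hp3, hp4, hp5]
      have hv : eKey a = 64 ∨ eKey a = 65 ∨ eKey a = 66 ∨ eKey a = 67 ∨ eKey a = 68 ∨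
          eKey a = 69 := by omega
      rcases hv with he | he | he | he | he | he
      · rw [hsome 64 he]; simp
      · rw [hnone 64 (by omega), hsome 65 he]; simp
      · rw [hnone 64 (by omega), hnone 65 (by omega), hsome 66 he]; simp
      · rw [hnone 64 (by omega), hnone 65 (by omega), hnone 66 (by omega), hsome 67 he]; simp
      · rw [hnone 64 (by omega), hnone 65 (by omega), hnone 66 (by omega), hnone 67 (by omega),
          hsome 68 he]; simp
      · rw [hnone 64 (by omega), hnone 65 (by omega), hnone 66 (by omega), hnone 67 (by omega),
          hnone 68 (by omega), hsome 69 he]; simp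
    · have h48 : ∀ x ∈ f0 :: rest, ¬ eKey x ≤ 48 := by
        intro x hx; have := hle x hx; omega
      have hp : ∀ (j : Nat) (hj : j < 6),
          List.find? (fun x => PySem.Str.lower x == pyPreferred[j] && !isUnitLike x) (f0 :: rest)
            = List.find? (fun x => decide (eKey x = 64 + j)) (f0 :: rest) :=
        fun j hj => find?_congr_mem _ _ _ (fun x hx => band4 j hj x (h48 x hx))
      have hp0 := hp 0 (by norm_num); have hp1 := hp 1 (by norm_num)
      have hp2 := hp 2 (by norm_num); have hp3 := hp 3 (by norm_num)
      have hp4 := hp 4 (by norm_num); have hp5 := hp 5 (by norm_num)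
      norm_num [pyPreferred] at hp0 hp1 hp2 hp3 hp4 hp5
      rw [hnone 16 (by omega), hnone 32 (by omega), hnoneLe 48 (by omega),
        hp0, hp1, hp2, hp3, hp4, hp5,
        hnone 64 (by omega), hnone 65 (by omega), hnone 66 (by omega), hnone 67 (by omega),
        hnone 68 (by omega), hnone 69 (by omega), hsomeLe 80 he]
      simp
    · have h48 : ∀ x ∈ f0 :: rest, ¬ eKey x ≤ 48 := by
        intro x hx; have := hle x hx; omega
      have hp : ∀ (j : Nat) (hj : j < 6),
          List.find? (fun x => PySem.Str.lower x == pyPreferred[j] && !isUnitLike x) (f0 :: rest)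
            = List.find? (fun x => decide (eKey x = 64 + j)) (f0 :: rest) :=
        fun j hj => find?_congr_mem _ _ _ (fun x hx => band4 j hj x (h48 x hx))
      have hp0 := hp 0 (by norm_num); have hp1 := hp 1 (by norm_num)
      have hp2 := hp 2 (by norm_num); have hp3 := hp 3 (by norm_num)
      have hp4 := hp 4 (by norm_num); have hp5 := hp 5 (by norm_num)
      norm_num [pyPreferred] at hp0 hp1 hp2 hp3 hp4 hp5
      rw [hnone 16 (by omega), hnone 32 (by omega), hnoneLe 48 (by omega),
        hp0, hp1, hp2, hp3, hp4, hp5,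
        hnone 64 (by omega), hnone 65 (by omega), hnone 66 (by omega), hnone 67 (by omega),
        hnone 68 (by omega), hnone 69 (by omega), hnoneLe 80 (by omega)]
      rw [he] at hfind
      rw [List.find?_cons_of_pos (by simp [eKey_le f0])] at hfind
      simpa using hfind
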